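-- pv_equiv track=rewrite | github.com/dirgogoo/MDAP-Agent | mdap/mdap/red_flag.py | _check_typescript_syntax
-- ===== SOURCE A (Python) =====
-- from typing import Optional
--
-- def _check_typescript_syntax(code: str) -> tuple[bool, Optional[str]]:
--     """
--     Verifica sintaxe TypeScript (básico).
--     Nota: verificação completa requer ts-morph ou similar.
--     """
--     # Verificação básica de balanceamento
--     brackets = {'{': '}', '[': ']', '(': ')'}
--     stack = []
--
--     in_string = False
--     string_char = None
--
--     for char in code:
--         if char in '"\'`' and not in_string:
--             in_string = True
--             string_char = char
--         elif char == string_char and in_string: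
--             in_string = False
--             string_char = None
--         elif not in_string:
--             if char in brackets:
--                 stack.append(brackets[char])
--             elif char in brackets.values():
--                 if not stack or stack.pop() != char:
--                     return False, f"Unbalanced brackets at '{char}'"
--
--     if stack:
--         return False, f"Unclosed brackets: {stack}"
--
--     return True, None
-- ===== SOURCE B (Python) =====
-- from typing import Optional
--
-- def _check_typescript_syntax(code: str) -> tuple[bool, Optional[str]]:
--     pairs = {'{': '}', '[': ']', '(': ')'}
--     # pass 1: strip string contents, keep only brackets outside strings
--     in_string = False
--     string_char = None
--     relevant = []
--     for char in code:
--         if not in_string and char in '"\'`':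
--             in_string = True
--             string_char = char
--         elif in_string and char == string_char:
--             in_string = False
--             string_char = None
--         elif not in_string and char in '{[()]}':
--             relevant.append(char)
--     # pass 2: match brackets (stack holds the OPENING brackets)
--     stack = []
--     for char in relevant:
--         if char in pairs:
--             stack.append(char)
--         else:
--             if not stack or pairs[stack.pop()] != char:
--                 return False, f"Unbalanced brackets at '{char}'"
--     if stack:
--         return False, f"Unclosed brackets: {[pairs[o] for o in stack]}"
--     return True, None
-- ===== Notes on version B (the rewrite author's own statement) =====
-- stated objective: alternative
-- what changed: A's single fused loop (string state machine + stack of expected closing brackets) is split into two passes: a filtering pass that strips string contents and keeps only brackets, then a matching pass whose stack holds the opening brackets and maps them to closers on pop and when printing the unclosed-bracket message.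
import Mathlib
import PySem

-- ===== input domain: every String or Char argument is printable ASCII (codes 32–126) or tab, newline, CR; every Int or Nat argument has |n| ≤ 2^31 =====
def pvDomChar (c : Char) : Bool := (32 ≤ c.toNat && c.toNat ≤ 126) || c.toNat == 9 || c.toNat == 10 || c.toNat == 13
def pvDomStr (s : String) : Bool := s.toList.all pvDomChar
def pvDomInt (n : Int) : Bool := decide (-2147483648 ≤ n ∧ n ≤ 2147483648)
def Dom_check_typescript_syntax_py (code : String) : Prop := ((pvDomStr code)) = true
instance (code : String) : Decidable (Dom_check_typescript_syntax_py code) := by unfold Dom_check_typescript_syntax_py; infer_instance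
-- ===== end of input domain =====

-- B is an alternative decomposition of A (string-stripping pass, then a bracket-matching
-- pass over openers), same cost; equivalence of return values is proved on all inputs.

-- ===== PORT A =====
-- shared rendering of Python's str(list-of-one-char-strings), e.g. "['}', ')']"
def pvReprStack (stack : List Char) : String :=
  "[" ++ String.intercalate ", " (stack.map (fun c => "'" ++ String.ofList [c] ++ "'")) ++ "]"

def pvCloseOf (c : Char) : Char :=
  if c = '{' then '}' else if c = '[' then ']' else ')'

-- A's single loop; the Python stack grows/pops at the END, modeled top-at-head and
-- reversed wherever the list is printed.
def pvLoopA : List Char → Bool → Option Char → List Char → Bool × Option String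
  | [], _, _, stack =>
    if stack = [] then (true, none)
    else (false, some ("Unclosed brackets: " ++ pvReprStack stack.reverse))
  | c :: rest, inS, sc, stack =>
    if (c = '"' ∨ c = '\'' ∨ c = '`') ∧ inS = false then
      pvLoopA rest true (some c) stack
    else if sc = some c ∧ inS = true then
      pvLoopA rest false none stack
    else if inS = false then
      if c = '{' ∨ c = '[' ∨ c = '(' then
        pvLoopA rest inS sc (pvCloseOf c :: stack)
      else if c = '}' ∨ c = ']' ∨ c = ')' then
        match stack with
        | [] => (false, some ("Unbalanced brackets at '" ++ String.ofList [c] ++ "'"))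
        | t :: stack' =>
          if t ≠ c then (false, some ("Unbalanced brackets at '" ++ String.ofList [c] ++ "'"))
          else pvLoopA rest inS sc stack'
      else pvLoopA rest inS sc stack
    else pvLoopA rest inS sc stack

def check_typescript_syntax_py (code : String) : Bool × Option String :=
  pvLoopA code.toList false none []

-- ===== PORT B =====
-- pass 1: keep only brackets occurring outside strings
def pvFilterB : List Char → Bool → Option Char → List Char
  | [], _, _ => []
  | c :: rest, inS, sc =>
    if inS = false ∧ (c = '"' ∨ c = '\'' ∨ c = '`') then
      pvFilterB rest true (some c)
    else if inS = true ∧ sc = some c then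
      pvFilterB rest false none
    else if inS = false ∧ (c = '{' ∨ c = '[' ∨ c = '(' ∨ c = ')' ∨ c = ']' ∨ c = '}') then
      c :: pvFilterB rest inS sc
    else pvFilterB rest inS sc

-- pass 2: stack of OPENING brackets (top-at-head, reversed where printed)
def pvCheckB : List Char → List Char → Bool × Option String
  | [], stack =>
    if stack = [] then (true, none)
    else (false, some ("Unclosed brackets: " ++ pvReprStack (stack.reverse.map pvCloseOf)))
  | c :: rest, stack =>
    if c = '{' ∨ c = '[' ∨ c = '(' then pvCheckB rest (c :: stack)
    else
      match stack with
      | [] => (false, some ("Unbalanced brackets at '" ++ String.ofList [c] ++ "'"))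
      | t :: stack' =>
        if pvCloseOf t ≠ c then (false, some ("Unbalanced brackets at '" ++ String.ofList [c] ++ "'"))
        else pvCheckB rest stack'

def check_typescript_syntax_py_alt (code : String) : Bool × Option String :=
  pvCheckB (pvFilterB code.toList false none) []

-- ===== PRECONDITION & SPEC =====
def Spec_check_typescript_syntax_py (code : String) (out : Bool × Option String) : Prop := out = check_typescript_syntax_py_alt code
instance (code : String) (out : Bool × Option String) : Decidable (Spec_check_typescript_syntax_py code out) := by unfold Spec_check_typescript_syntax_py; infer_instance

-- ===== CLAIM (what is proved, stated in full; the proofs are below) =====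
def Claim_equal_check_typescript_syntax_py : Prop := ∀ (code : String), Dom_check_typescript_syntax_py code → Spec_check_typescript_syntax_py code (check_typescript_syntax_py code)

-- ===== LEMMAS AND PROOFS =====

-- Fusion: A's single loop on a stack of closers equals B's check pass run on B's
-- filtered list with the corresponding stack of openers.
lemma pvLoop_fusion : ∀ (cs : List Char) (inS : Bool) (sc : Option Char) (sB : List Char),
    pvLoopA cs inS sc (sB.map pvCloseOf) = pvCheckB (pvFilterB cs inS sc) sB := by
  intro cs
  induction cs with
  | nil =>
    intro inS sc sB
    simp only [pvLoopA, pvFilterB, pvCheckB]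
    rcases sB with _ | ⟨t, r⟩
    · simp
    · simp [pvReprStack, List.map_reverse]
  | cons c rest ih =>
    intro inS sc sB
    simp only [pvLoopA, pvFilterB]
    by_cases hq : (c = '"' ∨ c = '\'' ∨ c = '`') ∧ inS = false
    · rw [if_pos hq, if_pos ⟨hq.2, hq.1⟩, ih]
    · rw [if_neg hq]
      by_cases hq' : inS = false ∧ (c = '"' ∨ c = '\'' ∨ c = '`')
      · exact absurd ⟨hq'.2, hq'.1⟩ hq
      rw [if_neg hq']
      by_cases hcl : sc = some c ∧ inS = true
      · rw [if_pos hcl, if_pos ⟨hcl.2, hcl.1⟩, ih]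
      · rw [if_neg hcl]
        by_cases hcl' : inS = true ∧ sc = some c
        · exact absurd ⟨hcl'.2, hcl'.1⟩ hcl
        rw [if_neg hcl']
        by_cases hin : inS = false
        · rw [if_pos hin]
          by_cases hop : c = '{' ∨ c = '[' ∨ c = '('
          · have hbr : inS = false ∧ (c = '{' ∨ c = '[' ∨ c = '(' ∨ c = ')' ∨ c = ']' ∨ c = '}') := by
              tauto
            rw [if_pos hop, if_pos hbr]
            simp only [pvCheckB, if_pos hop]
            exact ih inS sc (c :: sB)
          · rw [if_neg hop]
            by_cases hclb : c = '}' ∨ c = ']' ∨ c = ')'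
            · have hbr : inS = false ∧ (c = '{' ∨ c = '[' ∨ c = '(' ∨ c = ')' ∨ c = ']' ∨ c = '}') := by
                tauto
              rw [if_pos hclb, if_pos hbr]
              simp only [pvCheckB, if_neg hop]
              rcases sB with _ | ⟨t, r⟩
              · simp
              · simp only [List.map_cons]
                by_cases he : pvCloseOf t = c
                · rw [if_neg (by simpa using he), if_neg (by simpa using he)]
                  exact ih inS sc r
                · rw [if_pos (by simpa using he), if_pos (by simpa using he)]
            · rw [if_neg hclb, if_neg (show ¬(inS = false ∧ (c = '{' ∨ c = '[' ∨ c = '(' ∨ c = ')' ∨ c = ']' ∨ c = '}')) by tauto), ih]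
        · rw [if_neg hin, if_neg (show ¬(inS = false ∧ (c = '{' ∨ c = '[' ∨ c = '(' ∨ c = ')' ∨ c = ']' ∨ c = '}')) by tauto), ih]

-- ===== VERDICT (by name: the statement is the Claim_ definition above) =====
theorem check_typescript_syntax_py_spec : Claim_equal_check_typescript_syntax_py := by
  intro code _
  unfold Spec_check_typescript_syntax_py check_typescript_syntax_py check_typescript_syntax_py_alt
  simpa using pvLoop_fusion code.toList false none []
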